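-- pv_equiv track=rewrite | github.com/gaju91/dsa-journey | 01-fundamentals/00-arrays/algorithms/06_interview_classics.py | max_subarray_with_indices
-- ===== SOURCE A (Python) =====
-- def max_subarray_with_indices(arr):
--     """
--     Kadane's with start/end indices
--
--     Returns: (max_sum, start, end)
--     """
--     max_sum = arr[0]
--     current_sum = arr[0]
--     start = end = 0
--     temp_start = 0
--
--     for i in range(1, len(arr)):
--         if arr[i] > current_sum + arr[i]:
--             current_sum = arr[i]
--             temp_start = i
--         else:
--             current_sum += arr[i]
--
--         if current_sum > max_sum:
--             max_sum = current_sum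
--             start = temp_start
--             end = i
--
--     return max_sum, start, end
-- ===== SOURCE B (Python) =====
-- def max_subarray_with_indices(arr):
--     """
--     Prefix-sum / minimum-prefix scan over the elements themselves.
--
--     Returns: (max_sum, start, end)
--     """
--     best, start, end = arr[0], 0, 0
--     total = arr[0]          # cumulative sum so far
--     min_prefix = 0          # smallest prefix sum strictly before current position
--     min_idx = 0
--     i = 1
--     for x in arr[1:]:
--         if total < min_prefix:
--             min_prefix = total
--             min_idx = i
--         total += x
--         if total - min_prefix > best:
--             best = total - min_prefix
--             start = min_idx
--             end = i
--         i += 1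
--     return best, start, end
-- ===== Notes on version B (the rewrite author's own statement) =====
-- stated objective: alternative
-- what changed: Replaces Kadane's running-best-suffix recurrence (index loop) by a prefix-sum scan over the elements that tracks the minimum prefix sum and its index, taking best-ending-here = total - min_prefix.
import Mathlib
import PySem

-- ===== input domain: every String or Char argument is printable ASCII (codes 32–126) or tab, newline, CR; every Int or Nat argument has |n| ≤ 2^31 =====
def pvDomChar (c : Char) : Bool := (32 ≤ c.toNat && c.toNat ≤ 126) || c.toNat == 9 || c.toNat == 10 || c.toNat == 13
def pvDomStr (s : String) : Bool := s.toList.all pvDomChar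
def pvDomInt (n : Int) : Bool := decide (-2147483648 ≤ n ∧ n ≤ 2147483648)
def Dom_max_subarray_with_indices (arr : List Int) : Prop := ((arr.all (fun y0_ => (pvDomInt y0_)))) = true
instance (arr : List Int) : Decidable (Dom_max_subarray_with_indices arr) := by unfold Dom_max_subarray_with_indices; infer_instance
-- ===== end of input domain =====

-- B replaces Kadane's recurrence by a prefix-sum / minimum-prefix scan over the elements (alternative decomposition, same cost).


-- ===== PORT A =====
-- state (max_sum, current_sum, start, end, temp_start)
def pvStepA (arr : List Int) : (Int × Int × Int × Int × Int) → Int → (Int × Int × Int × Int × Int)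
  | (ms, cs, s, e, ts), i =>
    let ai := PySem.List.pyGetD arr i 0   -- element at i; in range for every generated index
    let cs' := if ai > cs + ai then ai else cs + ai
    let ts' := if ai > cs + ai then i else ts
    if cs' > ms then (cs', cs', ts', i, ts') else (ms, cs', s, e, ts')

def max_subarray_with_indices (arr : List Int) : Int × Int × Int :=
  let a0 := PySem.List.pyGetD arr 0 0     -- first element; exact under Pre_ (arr ≠ [])
  let fin := (PySem.List.pyRange 1 arr.length 1).foldl (pvStepA arr) (a0, a0, 0, 0, 0)
  (fin.1, fin.2.2.1, fin.2.2.2.1)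

-- ===== PORT B =====
-- 'for x in arr[1:]' with counter i: structural recursion on the remaining elements;
-- state (best, start, end, total, min_prefix, min_idx)
def pvGoB : List Int → Int → (Int × Int × Int × Int × Int × Int) → Int × Int × Int
  | [], _, (best, s, e, _, _, _) => (best, s, e)
  | x :: rest, i, (best, s, e, total, mp, mi) =>
    let mp' := if total < mp then total else mp
    let mi' := if total < mp then i else mi
    let t' := total + x
    if t' - mp' > best then pvGoB rest (i + 1) (t' - mp', mi', i, t', mp', mi')
    else pvGoB rest (i + 1) (best, s, e, t', mp', mi')

def max_subarray_with_indices_alt (arr : List Int) : Int × Int × Int :=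
  let a0 := PySem.List.pyGetD arr 0 0     -- first element; exact under Pre_ (arr ≠ [])
  pvGoB (PySem.List.slice arr (some 1) none) 1 (a0, 0, 0, a0, 0, 0)

-- ===== PRECONDITION & SPEC =====
-- Pre_ excludes only the empty list, on which the Python A (and B) raise IndexError at the first-element access.
def Pre_max_subarray_with_indices (arr : List Int) : Prop := arr ≠ []
instance (arr : List Int) : Decidable (Pre_max_subarray_with_indices arr) := by unfold Pre_max_subarray_with_indices; infer_instance
def pvWitness_max_subarray_with_indices : List Int := [1, -2, 3]

def Spec_max_subarray_with_indices (arr : List Int) (out : Int × Int × Int) : Prop := out = max_subarray_with_indices_alt arr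
instance (arr : List Int) (out : Int × Int × Int) : Decidable (Spec_max_subarray_with_indices arr out) := by unfold Spec_max_subarray_with_indices; infer_instance

-- ===== CLAIM (what is proved, stated in full; the proofs are below) =====
def Claim_equal_max_subarray_with_indices : Prop := ∀ (arr : List Int), Dom_max_subarray_with_indices arr → Pre_max_subarray_with_indices arr → Spec_max_subarray_with_indices arr (max_subarray_with_indices arr)

-- ===== LEMMAS AND PROOFS =====

-- Proof-only uncurried step for B, to relate pvGoB to a foldl over indices.
def pvStepB (arr : List Int) : (Int × Int × Int × Int × Int × Int) → Int → (Int × Int × Int × Int × Int × Int)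
  | (best, s, e, total, mp, mi), i =>
    let mp' := if total < mp then total else mp
    let mi' := if total < mp then i else mi
    let ai := PySem.List.pyGetD arr i 0
    let t' := total + ai
    if t' - mp' > best then (t' - mp', mi', i, t', mp', mi') else (best, s, e, t', mp', mi')

-- One step of A equals the image of one step of B under the simulation
-- Φ (b, s, e, t, mp, mi) = (b, t - mp, s, e, mi).
theorem pv_step (arr : List Int) (b s e t mp mi i : Int) :
    pvStepA arr (b, t - mp, s, e, mi) i =
    ((pvStepB arr (b, s, e, t, mp, mi) i).1,
     (pvStepB arr (b, s, e, t, mp, mi) i).2.2.2.1 - (pvStepB arr (b, s, e, t, mp, mi) i).2.2.2.2.1,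
     (pvStepB arr (b, s, e, t, mp, mi) i).2.1,
     (pvStepB arr (b, s, e, t, mp, mi) i).2.2.1,
     (pvStepB arr (b, s, e, t, mp, mi) i).2.2.2.2.2) := by
  simp only [pvStepA, pvStepB]
  split_ifs <;> simp_all [Prod.mk.injEq] <;> omega

-- The whole loops stay in simulation.
theorem pv_sync (arr : List Int) (l : List Int) :
    ∀ (b s e t mp mi : Int),
    l.foldl (pvStepA arr) (b, t - mp, s, e, mi) =
    ((l.foldl (pvStepB arr) (b, s, e, t, mp, mi)).1,
     (l.foldl (pvStepB arr) (b, s, e, t, mp, mi)).2.2.2.1 - (l.foldl (pvStepB arr) (b, s, e, t, mp, mi)).2.2.2.2.1,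
     (l.foldl (pvStepB arr) (b, s, e, t, mp, mi)).2.1,
     (l.foldl (pvStepB arr) (b, s, e, t, mp, mi)).2.2.1,
     (l.foldl (pvStepB arr) (b, s, e, t, mp, mi)).2.2.2.2.2) := by
  induction l with
  | nil => intro b s e t mp mi; rfl
  | cons i l ih =>
    intro b s e t mp mi
    rw [List.foldl_cons, List.foldl_cons, pv_step]
    exact ih _ _ _ _ _ _

-- pvGoB over the tail of arr computes the projections of the index-foldl of pvStepB.
theorem pvGoB_eq_foldl (arr : List Int) : ∀ (k : Nat) (st : Int × Int × Int × Int × Int × Int),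
    pvGoB (arr.drop k) (k : Int) st =
    (((PySem.List.pyRange k arr.length 1).foldl (pvStepB arr) st).1,
     ((PySem.List.pyRange k arr.length 1).foldl (pvStepB arr) st).2.1,
     ((PySem.List.pyRange k arr.length 1).foldl (pvStepB arr) st).2.2.1) := by
  intro k
  induction hn : arr.length - k generalizing k with
  | zero =>
    intro st
    have hk : arr.length ≤ k := by omega
    rw [List.drop_eq_nil_of_le hk, PySem.List.pyRange_one_eq_nil (by exact_mod_cast hk)]
    obtain ⟨b, s, e, t, mp, mi⟩ := st
    rfl
  | succ n ih =>
    intro st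
    have hk : k < arr.length := by omega
    rw [List.drop_eq_getElem_cons hk,
        PySem.List.pyRange_one_cons (by exact_mod_cast hk), List.foldl_cons]
    obtain ⟨b, s, e, t, mp, mi⟩ := st
    have harr : PySem.List.pyGetD arr (k : Int) 0 = arr[k] := by
      rw [PySem.List.pyGetD_natCast]; exact List.getD_eq_getElem arr 0 hk
    have hcast : ((k : Int) + 1) = ((k + 1 : Nat) : Int) := by push_cast; ring
    simp only [pvGoB, pvStepB, harr, hcast]
    split_ifs <;> rw [ih (k + 1) (by omega)]

-- ===== VERDICT (by name: the statement is the Claim_ definition above) =====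
theorem max_subarray_with_indices_spec : Claim_equal_max_subarray_with_indices := by
  intro arr _ _
  unfold Spec_max_subarray_with_indices max_subarray_with_indices max_subarray_with_indices_alt
  have hs : PySem.List.slice arr (some 1) none = arr.drop 1 := by
    have := PySem.List.slice_from_natCast arr 1
    simpa using this
  have hg := pvGoB_eq_foldl arr 1 ((PySem.List.pyGetD arr 0 0), 0, 0, (PySem.List.pyGetD arr 0 0), 0, 0)
  have h := pv_sync arr (PySem.List.pyRange 1 arr.length 1)
      (PySem.List.pyGetD arr 0 0) 0 0 (PySem.List.pyGetD arr 0 0) 0 0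
  simp only [sub_zero] at h
  simp only [h, hs, Nat.cast_one] at *
  rw [hg]
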